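-- pv_equiv track=rewrite | github.com/paiml/depyler | examples/hard_numeric_finite_diff.py | second_derivative
-- ===== SOURCE A (Python) =====
-- def second_derivative(vals: list[int], h: int) -> list[int]:
--     """Second derivative: f''(i) ~ (f(i+1)-2*f(i)+f(i-1))/h^2.
--     Returns derivatives * h^2."""
--     n: int = len(vals)
--     result: list[int] = []
--     i: int = 1
--     while i < n - 1:
--         d: int = vals[i + 1] - 2 * vals[i] + vals[i - 1]
--         result.append(d)
--         i = i + 1
--     return result
-- ===== SOURCE B (Python) =====
-- def second_derivative(vals: list[int], h: int) -> list[int]: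
--     """Two-pass decomposition: second difference = first difference applied twice."""
--     d1 = [b - a for a, b in zip(vals, vals[1:])]
--     return [b - a for a, b in zip(d1, d1[1:])]
-- ===== Notes on version B (the rewrite author's own statement) =====
-- stated objective: alternative
-- what changed: Replaces A's single fused 3-point window loop with a two-pass decomposition: build the list of first differences, then take the first differences of that intermediate list.
import Mathlib
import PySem

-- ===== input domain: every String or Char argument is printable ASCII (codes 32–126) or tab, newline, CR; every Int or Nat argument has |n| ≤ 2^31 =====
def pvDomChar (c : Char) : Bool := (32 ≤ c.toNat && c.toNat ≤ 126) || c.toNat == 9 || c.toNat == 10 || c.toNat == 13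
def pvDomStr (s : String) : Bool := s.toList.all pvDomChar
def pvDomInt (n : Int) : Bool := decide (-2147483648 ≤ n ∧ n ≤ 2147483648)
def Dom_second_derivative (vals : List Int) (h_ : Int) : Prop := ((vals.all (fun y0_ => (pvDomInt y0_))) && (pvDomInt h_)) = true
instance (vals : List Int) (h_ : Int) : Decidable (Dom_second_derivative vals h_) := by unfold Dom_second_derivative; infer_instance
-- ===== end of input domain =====

-- B replaces A's fused 3-point window loop with two passes of first differences; objective: alternative decomposition.

-- ===== PORT A =====
-- while i < n-1: result.append(vals[i+1] - 2*vals[i] + vals[i-1]); i += 1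
-- ported as a fold over range(1, n-1); all three indices are in range there, so pyGetD's default is never used.
def second_derivative (vals : List Int) (h_ : Int) : List Int :=
  let n : Int := PySem.List.len vals
  (PySem.List.pyRange 1 (n - 1) 1).foldl
    (fun result i =>
      result ++ [PySem.List.pyGetD vals (i + 1) 0 - 2 * PySem.List.pyGetD vals i 0
                  + PySem.List.pyGetD vals (i - 1) 0]) []

-- ===== PORT B =====
-- [b - a for a, b in zip(xs, xs[1:])]
def pvDiff1 (xs : List Int) : List Int :=
  (xs.zip (PySem.List.slice xs (some 1) none)).map (fun p => p.2 - p.1)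

def second_derivative_alt (vals : List Int) (h_ : Int) : List Int :=
  let d1 := pvDiff1 vals
  pvDiff1 d1

-- ===== PRECONDITION & SPEC =====
def Spec_second_derivative (vals : List Int) (h_ : Int) (out : List Int) : Prop := out = second_derivative_alt vals h_
instance (vals : List Int) (h_ : Int) (out : List Int) : Decidable (Spec_second_derivative vals h_ out) := by unfold Spec_second_derivative; infer_instance

-- ===== CLAIM (what is proved, stated in full; the proofs are below) =====
def Claim_equal_second_derivative : Prop := ∀ (vals : List Int) (h_ : Int), Dom_second_derivative vals h_ → Spec_second_derivative vals h_ (second_derivative vals h_)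

-- ===== LEMMAS AND PROOFS =====

theorem pvDiff1_length (xs : List Int) : (pvDiff1 xs).length = xs.length - 1 := by
  simp [pvDiff1, PySem.List.slice_from_one]

theorem pvDiff1_getElem (xs : List Int) (k : Nat) (hk : k < (pvDiff1 xs).length) :
    (pvDiff1 xs)[k] = xs[k + 1]'(by have := pvDiff1_length xs; omega) - xs[k]'(by have := pvDiff1_length xs; omega) := by
  have hl := pvDiff1_length xs
  simp [pvDiff1, PySem.List.slice_from_one] at hk ⊢

theorem second_derivative_spec : Claim_equal_second_derivative := by
  intro vals h_ _
  unfold Spec_second_derivative second_derivative second_derivative_alt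
  rw [PySem.List.foldl_append_singleton_eq_map, List.nil_append, PySem.List.pyRange_one]
  have hlen2 : ((PySem.List.len vals - 1 - 1).toNat) = vals.length - 2 := by
    simp [PySem.List.len_eq]; omega
  apply List.ext_getElem
  · simp [pvDiff1_length]
  · intro k hk1 hk2
    have hd2 := pvDiff1_length (pvDiff1 vals)
    have hd1 := pvDiff1_length vals
    have hkb : k < vals.length - 2 := by simp at hk1; omega
    rw [pvDiff1_getElem, pvDiff1_getElem, pvDiff1_getElem]
    simp
    rw [PySem.List.pyGetD_eq_getElem vals (i := (1:Int) + k + 1) 0 (by omega) (by omega),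
        PySem.List.pyGetD_eq_getElem vals (i := (1:Int) + k) 0 (by omega) (by omega)]
    have h1 : ((1:Int) + k + 1).toNat = k + 2 := by omega
    have h2 : ((1:Int) + k).toNat = k + 1 := by omega
    simp [h1, h2, List.getElem?_eq_getElem (show k < vals.length by omega)]
    ring
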